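-- pv_equiv track=rewrite | github.com/YamiJosema/TFG-RN | Pentominos/Completo.py | rango_por_letra
-- ===== SOURCE A (Python) =====
-- def rango_por_letra(orden):
--     rangos={}
--     posicion=1
--     cuatro_posiciones=["T","U","V","W","Z"]
--     for letra in orden:
--         if letra in cuatro_posiciones:
--             rangos[letra]=(posicion,posicion+3)
--             posicion+=4
--         elif letra=="X":
--             rangos[letra]=(posicion,posicion)
--             posicion+=1
--         elif letra=="I":
--             rangos[letra]=(posicion,posicion+1)
--             posicion+=2
--         else:
--             rangos[letra]=(posicion,posicion+7)
--             posicion+=8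
--     return rangos
-- ===== SOURCE B (Python) =====
-- def rango_por_letra(orden):
--     # Divide and conquer: solve each half independently at base 1, then shift the
--     # right half's ranges up by the left half's total width and concatenate.
--     def width(letra):
--         if letra in ("T", "U", "V", "W", "Z"):
--             return 4
--         elif letra == "X":
--             return 1
--         elif letra == "I":
--             return 2
--         else:
--             return 8
--
--     def solve(letras):  # -> (list of (letra, (lo, hi)) at base 1, total width)
--         if len(letras) == 0:
--             return [], 0
--         if len(letras) == 1:
--             w = width(letras[0])
--             return [(letras[0], (1, w))], w
--         mid = len(letras) // 2
--         left, wl = solve(letras[:mid])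
--         right, wr = solve(letras[mid:])
--         return left + [(l, (a + wl, b + wl)) for l, (a, b) in right], wl + wr
--
--     return dict(solve(orden)[0])
-- ===== Notes on version B (the rewrite author's own statement) =====
-- stated objective: alternative
-- what changed: Replaces A's single loop threading a running position by divide and conquer: each half of the list is solved independently at base 1, the right half's ranges are shifted by the left half's total width, concatenated, and dict() collapses duplicates (first position, last value) exactly as A's dict assignment.
import Mathlib
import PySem

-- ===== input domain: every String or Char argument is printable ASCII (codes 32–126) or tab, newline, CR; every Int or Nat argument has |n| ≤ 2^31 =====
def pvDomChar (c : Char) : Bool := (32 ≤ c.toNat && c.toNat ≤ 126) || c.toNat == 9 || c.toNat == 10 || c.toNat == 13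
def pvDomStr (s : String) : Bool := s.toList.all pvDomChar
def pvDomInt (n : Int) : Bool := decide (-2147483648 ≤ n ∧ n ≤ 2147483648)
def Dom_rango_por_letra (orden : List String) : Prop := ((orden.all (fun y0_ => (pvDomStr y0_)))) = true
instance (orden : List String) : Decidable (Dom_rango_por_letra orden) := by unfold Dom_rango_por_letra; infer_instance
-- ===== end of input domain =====

-- B computes the ranges by divide and conquer (solve each half at base 1, shift the right half by the left half's total width) instead of A's loop threading a running position; alternative decomposition, same result.

-- ===== PORT A =====
def rango_por_letra (orden : List String) : List (String × Int × Int) :=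
  (orden.foldl
    (fun (st : PySem.Dict String (Int × Int) × Int) letra =>
      let rangos := st.1
      let posicion := st.2
      if ["T", "U", "V", "W", "Z"].contains letra then
        (rangos.insert letra (posicion, posicion + 3), posicion + 4)
      else if letra = "X" then
        (rangos.insert letra (posicion, posicion), posicion + 1)
      else if letra = "I" then
        (rangos.insert letra (posicion, posicion + 1), posicion + 2)
      else
        (rangos.insert letra (posicion, posicion + 7), posicion + 8))
    (PySem.Dict.empty, 1)).1.items

-- ===== PORT B =====
-- Source B's 'width' helper
def pvWidth (letra : String) : Int :=
  if ["T", "U", "V", "W", "Z"].contains letra then 4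
  else if letra = "X" then 1
  else if letra = "I" then 2
  else 8

-- Source B's 'solve': (ranges at base 1, total width); right half shifted by left half's width
def pvSolve (letras : List String) : List (String × (Int × Int)) × Int :=
  if letras.length = 0 then ([], 0)
  else if letras.length = 1 then
    ([(letras.headI, (1, pvWidth letras.headI))], pvWidth letras.headI)
  else
    let mid := letras.length / 2
    let left := pvSolve (letras.take mid)
    let right := pvSolve (letras.drop mid)
    (left.1 ++ right.1.map (fun q => (q.1, (q.2.1 + left.2, q.2.2 + left.2))), left.2 + right.2)
termination_by letras.length
decreasing_by
  · simp only [List.length_take]; omega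
  · simp only [List.length_drop]; omega

def rango_por_letra_alt (orden : List String) : List (String × Int × Int) :=
  (PySem.Dict.ofList (pvSolve orden).1).items

-- ===== PRECONDITION & SPEC =====
def Spec_rango_por_letra (orden : List String) (out : List (String × Int × Int)) : Prop := out = rango_por_letra_alt orden
instance (orden : List String) (out : List (String × Int × Int)) : Decidable (Spec_rango_por_letra orden out) := by unfold Spec_rango_por_letra; infer_instance

-- ===== CLAIM (what is proved, stated in full; the proofs are below) =====
def Claim_equal_rango_por_letra : Prop := ∀ (orden : List String), Dom_rango_por_letra orden → Spec_rango_por_letra orden (rango_por_letra orden)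

-- ===== LEMMAS AND PROOFS =====

-- ghost linear characterisation of the base-1 range list (proof-side only)
def pvRanges : List String → List (String × (Int × Int))
  | [] => []
  | letra :: rest =>
    (letra, (1, pvWidth letra)) ::
      (pvRanges rest).map (fun q => (q.1, (q.2.1 + pvWidth letra, q.2.2 + pvWidth letra)))

-- shifting a shifted range list adds the shifts
theorem pv_shift_shift (a b : Int) (xs : List (String × (Int × Int))) :
    (xs.map (fun q => (q.1, (q.2.1 + b, q.2.2 + b)))).map
        (fun q : String × (Int × Int) => (q.1, (q.2.1 + a, q.2.2 + a)))
      = xs.map (fun q => (q.1, (q.2.1 + (a + b), q.2.2 + (a + b)))) := by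
  rw [List.map_map]
  apply List.map_congr_left
  intro q _
  simp only [Function.comp]
  refine Prod.ext rfl (Prod.ext ?_ ?_) <;> simp <;> ring

theorem pv_shift_zero (xs : List (String × (Int × Int))) :
    xs.map (fun q : String × (Int × Int) => (q.1, (q.2.1 + (0 : Int), q.2.2 + (0 : Int)))) = xs := by
  have h : ∀ q : String × (Int × Int), (q.1, (q.2.1 + (0 : Int), q.2.2 + (0 : Int))) = q := by
    intro q; simp
  simp only [h, List.map_id']

theorem pvRanges_append (l r : List String) :
    pvRanges (l ++ r)
      = pvRanges l ++ (pvRanges r).map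
          (fun q => (q.1, (q.2.1 + (l.map pvWidth).sum, q.2.2 + (l.map pvWidth).sum))) := by
  induction l with
  | nil => simp [pvRanges]
  | cons x l ih =>
    simp only [List.cons_append, pvRanges, ih, List.map_append, pv_shift_shift,
      List.map_cons, List.sum_cons]

theorem pvSolve_eq (letras : List String) :
    pvSolve letras = (pvRanges letras, (letras.map pvWidth).sum) := by
  induction letras using pvSolve.induct with
  | case1 letras h0 =>
    rw [List.length_eq_zero_iff] at h0
    subst h0
    simp [pvSolve, pvRanges]
  | case2 letras h0 h1 =>
    rw [List.length_eq_one_iff] at h1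
    obtain ⟨x, rfl⟩ := h1
    simp [pvSolve, pvRanges]
  | case3 letras h0 h1 mid ihl ihr =>
    rw [pvSolve]
    simp only [if_neg h0, if_neg h1]
    rw [ihl, ihr]
    have hsplit : letras.take (letras.length / 2) ++ letras.drop (letras.length / 2) = letras :=
      List.take_append_drop _ _
    dsimp only
    simp only [Prod.mk.injEq]
    constructor
    · rw [← pvRanges_append, hsplit]
    · rw [← List.sum_append, ← List.map_append, hsplit]

theorem pv_loop_eq (orden : List String) :
    ∀ (d : PySem.Dict String (Int × Int)) (p : Int),
      (orden.foldl
        (fun (st : PySem.Dict String (Int × Int) × Int) letra =>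
          let rangos := st.1
          let posicion := st.2
          if ["T", "U", "V", "W", "Z"].contains letra then
            (rangos.insert letra (posicion, posicion + 3), posicion + 4)
          else if letra = "X" then
            (rangos.insert letra (posicion, posicion), posicion + 1)
          else if letra = "I" then
            (rangos.insert letra (posicion, posicion + 1), posicion + 2)
          else
            (rangos.insert letra (posicion, posicion + 7), posicion + 8))
        (d, p)).1
      =
      ((pvRanges orden).map (fun q => (q.1, (q.2.1 + (p - 1), q.2.2 + (p - 1))))).foldl
        (fun dd (q : String × (Int × Int)) => dd.insert q.1 q.2) d := by
  induction orden with
  | nil => intro d p; simp [pvRanges]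
  | cons letra rest ih =>
    intro d p
    simp only [List.foldl_cons, pvRanges, List.map_cons, pv_shift_shift]
    by_cases hT : ["T", "U", "V", "W", "Z"].contains letra
    · rw [if_pos hT]
      simp only [pvWidth, if_pos hT]
      rw [ih]
      have h1 : (1 : Int) + (p - 1) = p := by ring
      have h2 : p + 4 - 1 = p - 1 + 4 := by ring
      have h3 : (4 : Int) + (p - 1) = p + 3 := by ring
      rw [h1, h2, h3]
    · by_cases hX : letra = "X"
      · rw [if_neg hT, if_pos hX]
        simp only [pvWidth, if_neg hT, if_pos hX]
        rw [ih]
        have h1 : (1 : Int) + (p - 1) = p := by ring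
        have h2 : p + 1 - 1 = p - 1 + 1 := by ring
        rw [h1, h2]
      · by_cases hI : letra = "I"
        · rw [if_neg hT, if_neg hX, if_pos hI]
          simp only [pvWidth, if_neg hT, if_neg hX, if_pos hI]
          rw [ih]
          have h1 : (1 : Int) + (p - 1) = p := by ring
          have h2 : p + 2 - 1 = p - 1 + 2 := by ring
          have h3 : (2 : Int) + (p - 1) = p + 1 := by ring
          rw [h1, h2, h3]
        · rw [if_neg hT, if_neg hX, if_neg hI]
          simp only [pvWidth, if_neg hT, if_neg hX, if_neg hI]
          rw [ih]
          have h1 : (1 : Int) + (p - 1) = p := by ring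
          have h2 : p + 8 - 1 = p - 1 + 8 := by ring
          have h3 : (8 : Int) + (p - 1) = p + 7 := by ring
          rw [h1, h2, h3]

-- ===== VERDICT (by name: the statement is the Claim_ definition above) =====
theorem rango_por_letra_spec : Claim_equal_rango_por_letra := by
  intro orden _
  unfold Spec_rango_por_letra rango_por_letra rango_por_letra_alt
  rw [pv_loop_eq, pvSolve_eq]
  have h : (1 : Int) - 1 = 0 := by norm_num
  rw [h, pv_shift_zero]
  rfl
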